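-- pv_equiv track=rewrite | github.com/feldhausenryan/Cloud-Code | test_segment_base/getopt_0.py | long_has_args
-- ===== SOURCE A (Python) =====
-- def long_has_args(opt, longopts):
--     possibilities = [o for o in longopts if o.startswith(opt)]
--     if not possibilities:
--         raise GetoptError('option --%s not recognized' % opt, opt)
--     # Is there an exact match?
--     if opt in possibilities:
--         return False, opt
--     elif opt + '=' in possibilities:
--         return True, opt
--     # No exact match, so better be unique.
--     if len(possibilities) > 1:
--         # XXX since possibilities contains all valid continuations, might be
--         # nice to work them into the error msg
--         raise GetoptError('option --%s not a unique prefix' % opt, opt)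
--     assert len(possibilities) == 1
--     unique_match = possibilities[0]
--     has_arg = unique_match.endswith('=')
--     if has_arg:
--         unique_match = unique_match[:-1]
--     return has_arg, unique_match
-- ===== SOURCE B (Python) =====
-- class GetoptError(Exception):
--     opt = ''
--     msg = ''
--     def __init__(self, msg, opt=''):
--         self.msg = msg
--         self.opt = opt
--         Exception.__init__(self, msg, opt)
--
-- def long_has_args(opt, longopts):
--     # Exact forms first: direct membership in longopts, no prefix filtering.
--     # (Any exact hit is trivially its own prefix match, so A's ladder agrees.)
--     if opt in longopts:
--         return False, opt
--     if opt + '=' in longopts: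
--         return True, opt
--     # Otherwise the prefix must select exactly one option: take the first
--     # prefix match and make sure no second one follows (early exit).
--     it = iter(longopts)
--     match = next((o for o in it if o.startswith(opt)), None)
--     if match is None:
--         raise GetoptError('option --%s not recognized' % opt, opt)
--     if any(o.startswith(opt) for o in it):
--         raise GetoptError('option --%s not a unique prefix' % opt, opt)
--     if match.endswith('='):
--         return True, match[:-1]
--     return False, match
-- ===== Notes on version B (the rewrite author's own statement) =====
-- stated objective: alternative
-- what changed: B drops A's possibilities list entirely: it answers the exact and exact-with-'=' cases by direct membership in longopts, and otherwise locates the first prefix match with an iterator and checks the remaining iterator for a second match with early exit, instead of filtering then re-scanning the filtered list.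
-- outside the precondition, e.g. on long_has_args('x', ['y']): A raises, B raises; on long_has_args('a', ['ab', 'ac']): A raises, B raises
import Mathlib
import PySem

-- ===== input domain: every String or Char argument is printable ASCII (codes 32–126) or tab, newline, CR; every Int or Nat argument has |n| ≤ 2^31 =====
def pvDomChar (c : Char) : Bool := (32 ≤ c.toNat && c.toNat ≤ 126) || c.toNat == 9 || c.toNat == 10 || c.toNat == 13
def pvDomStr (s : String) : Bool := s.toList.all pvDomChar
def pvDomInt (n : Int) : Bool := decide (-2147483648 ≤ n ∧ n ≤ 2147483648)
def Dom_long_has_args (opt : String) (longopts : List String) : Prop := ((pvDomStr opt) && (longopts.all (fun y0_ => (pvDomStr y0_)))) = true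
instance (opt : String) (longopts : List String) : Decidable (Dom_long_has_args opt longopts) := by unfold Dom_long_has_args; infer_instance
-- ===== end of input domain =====

-- B drops the possibilities list: exact cases by direct membership in longopts, then a
-- first-match search plus a second-match check on the remainder (objective: alternative).


-- ===== PORT A =====
-- 'opt + "="' is ported as String.ofList (opt.toList ++ ['=']) — exact Python string concatenation.
def long_has_args (opt : String) (longopts : List String) : Bool × String :=
  let possibilities := longopts.filter (fun o => PySem.Str.startswith o opt)
  if possibilities.isEmpty then (false, "")        -- raise GetoptError 'not recognized' (outside Pre_)
  else if possibilities.contains opt then (false, opt)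
  else if possibilities.contains (String.ofList (opt.toList ++ ['='])) then (true, opt)
  else if possibilities.length > 1 then (false, "") -- raise GetoptError 'not a unique prefix' (outside Pre_)
  else
    let unique_match := (PySem.List.pyGet? possibilities 0).getD ""
    let has_arg := PySem.Str.endswith unique_match "="
    if has_arg then (has_arg, PySem.Str.slice unique_match none (some (-1)))
    else (has_arg, unique_match)

-- ===== PORT B =====
-- 'next((o for o in it if o.startswith(opt)), None)' on an iterator: first prefix match and
-- the untraversed remainder of the list.
def pvFirstMatch (opt : String) : List String → Option (String × List String)
  | [] => none
  | o :: t => if PySem.Str.startswith o opt then some (o, t) else pvFirstMatch opt t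

def long_has_args_alt (opt : String) (longopts : List String) : Bool × String :=
  if longopts.contains opt then (false, opt)
  else if longopts.contains (String.ofList (opt.toList ++ ['='])) then (true, opt)
  else
    match pvFirstMatch opt longopts with
    | none => (false, "")                         -- raise GetoptError 'not recognized' (outside Pre_)
    | some (m, rest) =>
      if rest.any (fun o => PySem.Str.startswith o opt) then (false, "")  -- raise 'not a unique prefix' (outside Pre_)
      else if PySem.Str.endswith m "=" then (true, PySem.Str.slice m none (some (-1)))
      else (false, m)

-- ===== PRECONDITION & SPEC =====
-- Pre_ excludes exactly the inputs where Python A raises GetoptError: no long option has opt as a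
-- prefix, or the prefix is ambiguous (several matches, none equal to opt or opt+'=').
def Pre_long_has_args (opt : String) (longopts : List String) : Prop :=
  0 < longopts.countP (fun o => PySem.Str.startswith o opt) ∧
  (opt ∈ longopts ∨ String.ofList (opt.toList ++ ['=']) ∈ longopts ∨
   longopts.countP (fun o => PySem.Str.startswith o opt) = 1)
instance (opt : String) (longopts : List String) : Decidable (Pre_long_has_args opt longopts) := by
  unfold Pre_long_has_args; infer_instance
def pvWitness_long_has_args : String × List String := ("foo", ["foobar", "x"])
def Spec_long_has_args (opt : String) (longopts : List String) (out : Bool × String) : Prop := out = long_has_args_alt opt longopts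
instance (opt : String) (longopts : List String) (out : Bool × String) : Decidable (Spec_long_has_args opt longopts out) := by unfold Spec_long_has_args; infer_instance

-- ===== CLAIM (what is proved, stated in full; the proofs are below) =====
def Claim_equal_long_has_args : Prop := ∀ (opt : String) (longopts : List String), Dom_long_has_args opt longopts → Pre_long_has_args opt longopts → Spec_long_has_args opt longopts (long_has_args opt longopts)

-- ===== LEMMAS AND PROOFS =====


theorem firstMatch_none (opt : String) (l : List String)
    (h : pvFirstMatch opt l = none) :
    l.filter (fun o => PySem.Str.startswith o opt) = [] := by
  induction l with
  | nil => rfl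
  | cons o t ih =>
    unfold pvFirstMatch at h
    by_cases hp : PySem.Str.startswith o opt = true
    · rw [if_pos hp] at h; exact absurd h (by simp)
    · rw [if_neg hp] at h
      rw [List.filter_cons_of_neg (by simpa using hp)]
      exact ih h

theorem firstMatch_some (opt : String) (l : List String) (m : String) (rest : List String)
    (h : pvFirstMatch opt l = some (m, rest)) :
    l.filter (fun o => PySem.Str.startswith o opt)
      = m :: rest.filter (fun o => PySem.Str.startswith o opt) := by
  induction l with
  | nil => exact absurd h (by simp [pvFirstMatch])
  | cons o t ih =>
    unfold pvFirstMatch at h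
    by_cases hp : PySem.Str.startswith o opt = true
    · rw [if_pos hp] at h
      rw [List.filter_cons_of_pos (by simpa using hp)]
      rw [Option.some.injEq, Prod.mk.injEq] at h
      rw [h.1, h.2]
    · rw [if_neg hp] at h
      rw [List.filter_cons_of_neg (by simpa using hp)]
      exact ih h




-- A = B on every input (at the excluded raise points both ports return the same sentinel).
theorem ports_agree (opt : String) (longopts : List String) :
    long_has_args opt longopts = long_has_args_alt opt longopts := by
  have hself : PySem.Chars.startswith opt.toList opt.toList = true := by
    simp [PySem.Chars.startswith_iff]
  have heqP : PySem.Chars.startswith (opt.toList ++ ['=']) opt.toList = true := by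
    simp [PySem.Chars.startswith_iff]
  have heqs : String.ofList (opt.toList ++ ['=']) = opt ++ "=" := by
    apply String.toList_injective; simp
  simp only [long_has_args, long_has_args_alt, heqs]
  by_cases h1 : opt ∈ longopts
  · have hexO : ∃ x ∈ longopts, PySem.Chars.startswith x.toList opt.toList = true :=
      ⟨opt, h1, hself⟩
    simp [h1, hself, hexO]
  · by_cases h2 : (opt ++ "=") ∈ longopts
    · have hexE : ∃ x ∈ longopts, PySem.Chars.startswith x.toList opt.toList = true :=
        ⟨opt ++ "=", h2, by simpa using heqP⟩
      simp [h1, h2, heqP, hexE]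
    · cases hfm : pvFirstMatch opt longopts with
      | none =>
        have hnil := firstMatch_none opt longopts hfm
        have hAll : ∀ a ∈ longopts, PySem.Chars.startswith a.toList opt.toList = false := by
          have := List.filter_eq_nil_iff.mp hnil
          simpa [PySem.Str.startswith] using this
        simp [h1, h2]
        intro x hx hpx
        exact absurd hpx (by simp [hAll x hx])
      | some p =>
        obtain ⟨m, rest⟩ := p
        have hfil := firstMatch_some opt longopts m rest hfm
        simp only [PySem.Str.startswith] at hfil
        have hmmem : m ∈ longopts ∧ PySem.Chars.startswith m.toList opt.toList = true := by
          have hm : m ∈ longopts.filter (fun o => PySem.Chars.startswith o.toList opt.toList) := by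
            rw [hfil]; exact List.mem_cons_self ..
          simpa using List.mem_filter.mp hm
        have hexM : ∃ x ∈ longopts, PySem.Chars.startswith x.toList opt.toList = true :=
          ⟨m, hmmem.1, hmmem.2⟩
        by_cases hany : rest.any (fun o => PySem.Str.startswith o opt) = true
        · have hex : ∃ x ∈ rest, PySem.Chars.startswith x.toList opt.toList = true := by
            simpa [PySem.Str.startswith] using hany
          have hrne : rest.filter (fun o => PySem.Chars.startswith o.toList opt.toList) ≠ [] := by
            rw [ne_eq, List.filter_eq_nil_iff]
            intro hall
            obtain ⟨x, hx, hpx⟩ := hex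
            exact absurd hpx (by simp [hall x hx])
          have hlen :
              1 < (longopts.filter (fun o => PySem.Chars.startswith o.toList opt.toList)).length := by
            rw [hfil]
            cases hr : rest.filter (fun o => PySem.Chars.startswith o.toList opt.toList) with
            | nil => exact absurd hr hrne
            | cons a t => simp
          simp [h1, h2, hex, hlen]
        · have hnex : ¬ ∃ x ∈ rest, PySem.Chars.startswith x.toList opt.toList = true := by
            simpa [PySem.Str.startswith] using hany
          have hone : longopts.filter (fun o => PySem.Chars.startswith o.toList opt.toList) = [m] := by
            rw [hfil, List.filter_eq_nil_iff.mpr]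
            intro x hx
            exact fun hpx => hnex ⟨x, hx, by simpa using hpx⟩
          have hom : opt ≠ m := fun h => h1 (h ▸ hmmem.1)
          have hem : opt ++ "=" ≠ m := fun h => h2 (h ▸ hmmem.1)
          simp only [PySem.Str.startswith] at hany
          simp [h1, h2, hnex, hone, hom, hem,
            PySem.List.pyGet?, PySem.List.pyIdx?]
          by_cases hend : PySem.Chars.endswith m.toList ['='] = true
          · simp [hend]
          · simp [hend]

-- ===== VERDICT (by name: the statement is the Claim_ definition above) =====
theorem long_has_args_spec : Claim_equal_long_has_args := by
  intro opt longopts _ _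
  unfold Spec_long_has_args
  exact ports_agree opt longopts
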